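-- pv_equiv track=rewrite | github.com/jcmc209/agressive_stats | xmodel.py | buscar_arbitro
-- ===== SOURCE A (Python) =====
-- from typing import Optional
--
-- def buscar_arbitro(nombre_input: str, perfiles: dict) -> Optional[str]:
--     """Búsqueda case-insensitive del nombre del árbitro (parcial o completo)."""
--     q = nombre_input.lower().strip()
--     arbitros = list(perfiles.keys())
--
--     for a in arbitros:
--         if a.lower() == q:
--             return a
--
--     candidatos = [a for a in arbitros if q in a.lower()]
--     if len(candidatos) == 1:
--         return candidatos[0]
--     if len(candidatos) > 1:
--         return min(candidatos, key=len)
--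
--     candidatos = [a for a in arbitros if a.lower() in q]
--     if candidatos:
--         return max(candidatos, key=len)
--
--     return None
-- ===== SOURCE B (Python) =====
-- def buscar_arbitro(nombre_input, perfiles):
--     """Single pass over the keys: exact match returns immediately; otherwise keep
--     the shortest key containing q (first on ties) and the longest key contained
--     in q (first on ties)."""
--     q = nombre_input.lower().strip()
--     best_contain = None
--     best_reverse = None
--     for a in perfiles.keys():
--         al = a.lower()
--         if al == q:
--             return a
--         if q in al:
--             if best_contain is None or len(a) < len(best_contain):
--                 best_contain = a
--         if al in q:
--             if best_reverse is None or len(best_reverse) < len(a):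
--                 best_reverse = a
--     return best_contain if best_contain is not None else best_reverse
-- ===== Notes on version B (the rewrite author's own statement) =====
-- stated objective: alternative
-- what changed: Replaces A's four separate traversals (exact-match loop, two filter passes, then min/max scans over candidate lists) by one single loop that lowercases each key once and maintains running best-contain (min-by-len, first on tie) and best-reverse (max-by-len, first on tie) candidates.
import Mathlib
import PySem

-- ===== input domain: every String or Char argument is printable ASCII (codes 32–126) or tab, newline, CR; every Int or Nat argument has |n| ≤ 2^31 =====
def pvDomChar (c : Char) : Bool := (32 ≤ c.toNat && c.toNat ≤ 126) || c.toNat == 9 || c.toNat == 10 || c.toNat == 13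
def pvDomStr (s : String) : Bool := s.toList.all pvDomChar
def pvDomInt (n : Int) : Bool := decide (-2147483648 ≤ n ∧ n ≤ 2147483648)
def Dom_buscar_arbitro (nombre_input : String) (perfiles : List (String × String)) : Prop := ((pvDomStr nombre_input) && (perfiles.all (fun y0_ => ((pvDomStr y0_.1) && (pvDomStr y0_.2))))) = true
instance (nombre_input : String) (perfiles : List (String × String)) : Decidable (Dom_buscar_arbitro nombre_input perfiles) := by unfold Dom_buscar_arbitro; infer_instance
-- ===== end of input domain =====

-- B replaces A's four traversals (exact loop, two filters, min/max scans) by one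
-- single loop keeping running best-contain/best-reverse candidates (objective: alternative single-pass decomposition).

-- ===== PORT A =====
def buscar_arbitro (nombre_input : String) (perfiles : List (String × String)) : Option String :=
  let q := PySem.Str.strip (PySem.Str.lower nombre_input)
  let arbitros := PySem.List.dedup (perfiles.map Prod.fst)
  match arbitros.find? (fun a => PySem.Str.lower a == q) with
  | some a => some a
  | none =>
    let candidatos := arbitros.filter (fun a => PySem.Str.isIn q (PySem.Str.lower a))
    if candidatos.length = 1 then candidatos[0]?
    else if 1 < candidatos.length then PySem.List.min? candidatos (fun a => PySem.Str.len a)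
    else
      let candidatos2 := arbitros.filter (fun a => PySem.Str.isIn (PySem.Str.lower a) q)
      if candidatos2 ≠ [] then PySem.List.max? candidatos2 (fun a => PySem.Str.len a)
      else none

-- ===== PORT B =====
-- 'if best is None or len(a) < len(best): best = a' (and the > twin)
def minStep (acc : Option String) (x : String) : Option String :=
  match acc with
  | none => some x
  | some m => if PySem.Str.len x < PySem.Str.len m then some x else some m

def maxStep (acc : Option String) (x : String) : Option String :=
  match acc with
  | none => some x
  | some m => if PySem.Str.len m < PySem.Str.len x then some x else some m

-- the single loop of Source B: state = (best_contain, best_reverse)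
def baGo (q : String) : List String → Option String → Option String → Option String
  | [], bc, br => match bc with | some b => some b | none => br
  | a :: rest, bc, br =>
    if PySem.Str.lower a == q then some a
    else baGo q rest
      (if PySem.Str.isIn q (PySem.Str.lower a) then minStep bc a else bc)
      (if PySem.Str.isIn (PySem.Str.lower a) q then maxStep br a else br)

def buscar_arbitro_alt (nombre_input : String) (perfiles : List (String × String)) : Option String :=
  let q := PySem.Str.strip (PySem.Str.lower nombre_input)
  baGo q (PySem.List.dedup (perfiles.map Prod.fst)) none none

-- ===== PRECONDITION & SPEC =====
def Spec_buscar_arbitro (nombre_input : String) (perfiles : List (String × String)) (out : Option String) : Prop := out = buscar_arbitro_alt nombre_input perfiles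
instance (nombre_input : String) (perfiles : List (String × String)) (out : Option String) : Decidable (Spec_buscar_arbitro nombre_input perfiles out) := by unfold Spec_buscar_arbitro; infer_instance

-- ===== CLAIM (what is proved, stated in full; the proofs are below) =====
def Claim_equal_buscar_arbitro : Prop := ∀ (nombre_input : String) (perfiles : List (String × String)), Dom_buscar_arbitro nombre_input perfiles → Spec_buscar_arbitro nombre_input perfiles (buscar_arbitro nombre_input perfiles)

-- ===== LEMMAS AND PROOFS =====

lemma min?_eq_foldl (l : List String) :
    PySem.List.min? l (fun a => PySem.Str.len a) = l.foldl minStep none := by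
  unfold PySem.List.min?
  congr 1
  funext acc x
  cases acc <;> simp [minStep]

lemma max?_eq_foldl (l : List String) :
    PySem.List.max? l (fun a => PySem.Str.len a) = l.foldl maxStep none := by
  unfold PySem.List.max?
  congr 1
  funext acc x
  cases acc <;> simp [maxStep]

-- loop invariant: baGo computes A's decomposition, with the accumulators folded in
lemma baGo_spec (q : String) (l : List String) (bc br : Option String) :
    baGo q l bc br =
      match l.find? (fun a => PySem.Str.lower a == q) with
      | some a => some a
      | none =>
        match (l.filter (fun a => PySem.Str.isIn q (PySem.Str.lower a))).foldl minStep bc with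
        | some b => some b
        | none => (l.filter (fun a => PySem.Str.isIn (PySem.Str.lower a) q)).foldl maxStep br := by
  induction l generalizing bc br with
  | nil => rfl
  | cons a rest ih =>
    rw [baGo]
    by_cases hx : (PySem.Str.lower a == q) = true
    · rw [if_pos hx, List.find?_cons_of_pos (p := fun a => PySem.Str.lower a == q) hx]
    · rw [if_neg hx, List.find?_cons_of_neg (p := fun a => PySem.Str.lower a == q) (by simpa using hx), ih]
      by_cases h1 : PySem.Str.isIn q (PySem.Str.lower a) = true <;>
        by_cases h2 : PySem.Str.isIn (PySem.Str.lower a) q = true <;>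
          simp only [List.filter_cons, h1, h2, if_true, if_false, Bool.false_eq_true,
            List.foldl_cons]

theorem buscar_arbitro_eq (nombre_input : String) (perfiles : List (String × String)) :
    buscar_arbitro nombre_input perfiles = buscar_arbitro_alt nombre_input perfiles := by
  unfold buscar_arbitro buscar_arbitro_alt
  rw [baGo_spec]
  set q := PySem.Str.strip (PySem.Str.lower nombre_input) with hq
  set l := PySem.List.dedup (perfiles.map Prod.fst) with hl
  cases hf : l.find? (fun a => PySem.Str.lower a == q) with
  | some a => simp only [hf]
  | none =>
    simp only [hf]
    set c1 := l.filter (fun a => PySem.Str.isIn q (PySem.Str.lower a)) with hc1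
    set c2 := l.filter (fun a => PySem.Str.isIn (PySem.Str.lower a) q) with hc2
    rw [← min?_eq_foldl, ← max?_eq_foldl]
    cases hm : PySem.List.min? c1 (fun a => PySem.Str.len a) with
    | none =>
      have hnil : c1 = [] := (PySem.List.min?_eq_none_iff _ _).mp hm
      rw [hnil]
      simp only [List.length_nil]
      norm_num
      intro h2
      rw [h2]
      rfl
    | some b =>
      match hone : c1, hm with
      | [x], hm =>
        have hbx : b = x := by
          have := PySem.List.min?_mem (key := fun a => PySem.Str.len a) hm
          simpa using this
        simp [hbx]
      | x :: y :: t, hm =>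
        simp

-- ===== VERDICT (by name: the statement is the Claim_ definition above) =====
theorem buscar_arbitro_spec : Claim_equal_buscar_arbitro := by
  intro n p _
  exact buscar_arbitro_eq n p
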